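/-
  `u_step` from a DECODE FACT (UserX/Decode.lean: `∀ has, Dec.IsInsn Dec.allCells (User.decMode has) bytes (Sem.instr keep len body) n`,
  made by `#udecode` / `#decode_all`):

      u_step_at fact hc hr [facts]         goal `User.Step L μ u Q`; `hc : CodeAt u.mem u.rip bytes`, `hr : L.Has u.rip bytes.length`
      u_step_code h off hrip [facts]       goal `User.Step L μ u Q`; `h : HasCode L u base code` (`code` a `#code_bytes`
                                           definition), the instruction at offset `off`, `hrip : u.rip = base + UInt64.ofNat off`;
                                           the decode fact is looked up (or made on the fly) by `User.codeInsnAt`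

  Both leave what `u_body` leaves: the side conditions in program order, then `Q u'`.
-/
import UserX.Tac
import UserX.Decode
import UserX.Code

/-- One instruction from its decode fact and the bytes at RIP. -/
syntax "u_step_at " term:max ppSpace term:max ppSpace term:max " [" Lean.Parser.Tactic.simpLemma,* "]" : tactic
macro_rules
  | `(tactic| u_step_at $fact $hc $hr [$extra,*]) => `(tactic| (
    refine X86.User.Step.of_isInsn_at $fact $hc $hr rfl ?_
    u_body [$extra,*]))

namespace UserX
open Lean Meta Elab Tactic X86 X86.User

/-- One instruction of a function held as a `#code_bytes` definition: look the decode fact up by the bytes at the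
offset, apply `Step.of_codeNat`, compute the body. -/
elab "u_step_code " h:ident ppSpace off:num ppSpace hrip:ident " [" facts:Lean.Parser.Tactic.simpLemma,* "]" : tactic =>
  withMainContext do
    let hE ← elabTerm h none
    let hT ← whnfR (← instantiateMVars (← inferType hE))
    unless hT.isAppOfArity ``X86.User.HasCode 4 do
      throwError "u_step_code: not a HasCode hypothesis: {hT}"
    let some codeName := (hT.getArg! 3).constName? | throwError "u_step_code: the code is not a constant: {hT.getArg! 3}"
    let (_, fact) ← codeInsnAt codeName off.getNat
    let factId := mkIdent fact
    let specId := mkIdent (codeName.str "spec")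
    evalTactic (← `(tactic| (
      refine X86.User.Step.of_codeNat (X86.User.HasCode.toNat $h $specId) $off (@$factId) $hrip (by decide) (by rfl) (by rfl) ?_
      u_body [$facts,*])))

end UserX
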